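-- pv_equiv track=rewrite | github.com/foreverxujiahuan/algorithm | 竞赛/A80/C.py | matchReplacement
-- ===== SOURCE A (Python) =====
-- from typing import List
--
-- def matchReplacement(s: str, sub: str, mappings: List[List[str]]) -> bool:
--     d = dict()
--     for mapping in mappings:
--         if mapping[0] in d.keys():
--             d[mapping[0]] += mapping[1]
--         else:
--             d[mapping[0]] = mapping[1]
--     length = len(sub)
--     starts = sub[0] + d.get(sub[0], "")
--     s_index = []
--     for start in starts:
--         for i in range(len(s)):
--             if s[i] == start:
--                 s_index.append(i)
--     candidates = []
--     for start in s_index: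
--         cur = s[start: start + length]
--         if len(cur) == length:
--             candidates.append(cur)
--     for candidate in candidates:
--         candidate = list(candidate)
--         temp = list(sub)
--         for i in range(length):
--             ch1 = candidate[i]
--             ch2 = sub[i]
--             if ch1 != ch2:
--                 if ch1 in d.get(ch2, ch2):
--                     temp[i] = ch1
--         if candidate == temp:
--             return True
--     return False
-- ===== SOURCE B (Python) =====
-- def matchReplacement(s, sub, mappings):
--     allowed = {}
--     for m in mappings:
--         allowed.setdefault(m[0], set()).update(m[1])
--     n, L = len(s), len(sub)
--     return any(
--         all(s[i + j] == sub[j] or s[i + j] in allowed.get(sub[j], set())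
--             for j in range(L))
--         for i in range(n - L + 1))
-- ===== Notes on version B (the rewrite author's own statement) =====
-- stated objective: faster
-- what changed: Replaces A's four-stage pipeline (concatenating replacement strings into a dict, collecting all indices of each possible first character, extracting full candidate substring copies, then rebuilding a mutated copy of sub and comparing lists) with one direct sliding-window any/all scan over a dict of character sets: no intermediate index/candidate lists are built and each window is abandoned at the first mismatching position instead of always paying the full pattern length.
-- outside the precondition, e.g. on matchReplacement('ab', '', []): A raises IndexError, B returns True; on matchReplacement('ab', 'a', [['x']]): A raises IndexError, B raises IndexError
import Mathlib
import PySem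

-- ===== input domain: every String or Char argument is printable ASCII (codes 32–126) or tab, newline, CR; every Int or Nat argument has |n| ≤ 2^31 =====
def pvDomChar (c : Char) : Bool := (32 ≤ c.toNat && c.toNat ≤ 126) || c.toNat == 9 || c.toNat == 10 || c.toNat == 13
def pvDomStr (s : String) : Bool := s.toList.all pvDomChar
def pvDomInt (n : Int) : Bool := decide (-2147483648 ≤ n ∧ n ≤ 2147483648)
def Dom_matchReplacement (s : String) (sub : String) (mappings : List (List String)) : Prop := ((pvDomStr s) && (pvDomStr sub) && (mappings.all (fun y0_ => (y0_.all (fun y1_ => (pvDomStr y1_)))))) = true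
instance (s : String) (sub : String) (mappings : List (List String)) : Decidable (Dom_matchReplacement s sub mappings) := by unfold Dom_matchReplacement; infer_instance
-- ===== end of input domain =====

-- B replaces A's four-stage pipeline (dict of concatenated replacement strings, index
-- collection per possible first character, candidate extraction, rebuild-and-compare)
-- with one direct sliding-window any/all scan over a dict of character sets: no
-- intermediate index/candidate lists, early exit per window (measured faster).

-- ===== PORT A =====
-- d = dict(); for mapping in mappings: concatenate mapping[1] onto d[mapping[0]]
def pvDictA (mappings : List (List String)) : PySem.Dict (List Char) (List Char) :=
  mappings.foldl (fun d mapping =>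
    let k := ((PySem.List.pyGet? mapping 0).getD "").toList
    let v := ((PySem.List.pyGet? mapping 1).getD "").toList
    match d.get? k with
    | some old => d.insert k (old ++ v)
    | none => d.insert k v) PySem.Dict.empty

-- the body of A's final loop: rebuild temp from sub, then compare with the candidate
-- (Python's `temp[i] = ch1` is List.set at the in-range index produced by range(length); exact there)
def pvCheckA (d : PySem.Dict (List Char) (List Char)) (subL : List Char) (length : Nat)
    (candidate : List Char) : Bool :=
  let temp := (PySem.List.pyRange 0 (length : Int)).foldl (fun temp i =>
      let ch1 := (PySem.List.pyGet? candidate i).getD ' '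
      let ch2 := (PySem.List.pyGet? subL i).getD ' '
      if ch1 ≠ ch2 then
        if (d.getD [ch2] [ch2]).contains ch1 then temp.set i.toNat ch1 else temp
      else temp) subL
  candidate == temp

-- for candidate in candidates: … return True / return False
def pvLoopA (d : PySem.Dict (List Char) (List Char)) (subL : List Char) (length : Nat) :
    List (List Char) → Bool
  | [] => false
  | c :: rest => if pvCheckA d subL length c then true else pvLoopA d subL length rest

def matchReplacement (s : String) (sub : String) (mappings : List (List String)) : Bool :=
  let sL := s.toList
  let subL := sub.toList
  let d := pvDictA mappings
  let length := subL.length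
  let c0 := (PySem.List.pyGet? subL 0).getD ' '          -- sub[0] (Pre_ excludes empty sub)
  let starts : List Char := c0 :: d.getD [c0] []          -- starts = sub[0] + d.get(sub[0], "")
  let s_index : List Int := starts.foldl (fun acc start =>
      (PySem.List.pyRange 0 (sL.length : Int)).foldl (fun acc i =>
        if ((PySem.List.pyGet? sL i).getD ' ') == start then acc ++ [i] else acc) acc) []
  let candidates : List (List Char) := s_index.foldl (fun acc start =>
      let cur := PySem.List.slice sL (some start) (some (start + (length : Int)))
      if cur.length == length then acc ++ [cur] else acc) []
  pvLoopA d subL length candidates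

-- ===== PORT B =====
-- allowed.setdefault(m[0], set()).update(m[1])
def pvAllowedB (mappings : List (List String)) : PySem.Dict (List Char) (PySem.Set Char) :=
  mappings.foldl (fun d m =>
    let k := ((PySem.List.pyGet? m 0).getD "").toList
    let v := ((PySem.List.pyGet? m 1).getD "").toList
    d.insert k (v.foldl PySem.Set.add (d.getD k (PySem.Set.ofList [])))) PySem.Dict.empty

def matchReplacement_alt (s : String) (sub : String) (mappings : List (List String)) : Bool :=
  let sL := s.toList
  let subL := sub.toList
  let allowed := pvAllowedB mappings
  let n := sL.length
  let L := subL.length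
  (PySem.List.pyRange 0 ((n : Int) - (L : Int) + 1)).any (fun i =>
    (PySem.List.pyRange 0 (L : Int)).all (fun j =>
      let a := (PySem.List.pyGet? sL (i + j)).getD ' '
      let b := (PySem.List.pyGet? subL j).getD ' '
      a == b || (allowed.getD [b] (PySem.Set.ofList [])).contains a))

-- ===== PRECONDITION & SPEC =====
-- Pre_ excludes exactly the inputs where A raises IndexError: empty sub (sub[0])
-- and mapping entries with fewer than two elements (mapping[0] / mapping[1]).
def Pre_matchReplacement (s : String) (sub : String) (mappings : List (List String)) : Prop :=
  sub.toList ≠ [] ∧ ∀ m ∈ mappings, 2 ≤ m.length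
instance (s : String) (sub : String) (mappings : List (List String)) : Decidable (Pre_matchReplacement s sub mappings) := by unfold Pre_matchReplacement; infer_instance

def pvWitness_matchReplacement : String × String × List (List String) :=
  ("xb", "ab", [["a", "x"]])

def Spec_matchReplacement (s : String) (sub : String) (mappings : List (List String)) (out : Bool) : Prop := out = matchReplacement_alt s sub mappings
instance (s : String) (sub : String) (mappings : List (List String)) (out : Bool) : Decidable (Spec_matchReplacement s sub mappings out) := by unfold Spec_matchReplacement; infer_instance

-- ===== CLAIM (what is proved, stated in full; the proofs are below) =====
def Claim_equal_matchReplacement : Prop := ∀ (s : String) (sub : String) (mappings : List (List String)), Dom_matchReplacement s sub mappings → Pre_matchReplacement s sub mappings → Spec_matchReplacement s sub mappings (matchReplacement s sub mappings)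


-- ===== LEMMAS AND PROOFS =====

-- set fold membership
theorem mem_foldl_add {c : Char} (v : List Char) (s0 : PySem.Set Char) :
    c ∈ v.foldl PySem.Set.add s0 ↔ c ∈ s0 ∨ c ∈ v := by
  induction v generalizing s0 with
  | nil => simp
  | cons x xs ih =>
    simp [List.foldl_cons, ih, PySem.Set.mem_add, List.mem_cons]
    tauto

-- getD via get?
theorem dict_getD_eq {κ ν : Type} [BEq κ] (d : PySem.Dict κ ν) (k : κ) (v : ν) :
    d.getD k v = (d.get? k).getD v := by simp [PySem.Dict.getD]

theorem get?_empty {κ ν : Type} [BEq κ] (k : κ) :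
    (PySem.Dict.empty : PySem.Dict κ ν).get? k = none := by
  simp [PySem.Dict.empty, PySem.Dict.get?]

theorem dict_rel (mappings : List (List String)) (key : List Char) (c : Char) :
    c ∈ (pvDictA mappings).getD key [] ↔ c ∈ (pvAllowedB mappings).getD key (PySem.Set.ofList []) := by
  suffices h : ∀ (dA : PySem.Dict (List Char) (List Char)) (dB : PySem.Dict (List Char) (PySem.Set Char)),
      (∀ key c, c ∈ dA.getD key [] ↔ c ∈ dB.getD key (PySem.Set.ofList [])) →
      ∀ key c,
        c ∈ (mappings.foldl (fun d mapping =>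
          let k := ((PySem.List.pyGet? mapping 0).getD "").toList
          let v := ((PySem.List.pyGet? mapping 1).getD "").toList
          match d.get? k with
          | some old => d.insert k (old ++ v)
          | none => d.insert k v) dA).getD key [] ↔
        c ∈ (mappings.foldl (fun d m =>
          let k := ((PySem.List.pyGet? m 0).getD "").toList
          let v := ((PySem.List.pyGet? m 1).getD "").toList
          d.insert k (v.foldl PySem.Set.add (d.getD k (PySem.Set.ofList [])))) dB).getD key (PySem.Set.ofList []) by
    exact h _ _ (by intro key c; simp [dict_getD_eq, get?_empty, PySem.Set.mem_ofList]) key c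
  induction mappings with
  | nil => intro dA dB h key c; exact h key c
  | cons m ms ih =>
    intro dA dB h key c
    simp only [List.foldl_cons]
    apply ih
    intro key' c'
    set k := ((PySem.List.pyGet? m 0).getD "").toList with hk
    set v := ((PySem.List.pyGet? m 1).getD "").toList with hv
    have hstepA : (match dA.get? k with
        | some old => dA.insert k (old ++ v)
        | none => dA.insert k v).getD key' [] =
        if key' = k then dA.getD k [] ++ v else dA.getD key' [] := by
      cases hg : dA.get? k with
      | some old =>
        simp only [dict_getD_eq, PySem.Dict.get?_insert, hg]
        split_ifs <;> simp [hg]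
      | none =>
        simp only [dict_getD_eq, PySem.Dict.get?_insert, hg]
        split_ifs <;> simp [hg]
    rw [hstepA, PySem.Dict.getD_insert]
    by_cases hkey : key' = k
    · rw [if_pos hkey, if_pos hkey]
      simp only [List.mem_append, mem_foldl_add]
      rw [h k c']
    · rw [if_neg hkey, if_neg hkey]
      exact h key' c'

theorem loopA_iff (d : PySem.Dict (List Char) (List Char)) (subL : List Char) (length : Nat)
    (cs : List (List Char)) :
    pvLoopA d subL length cs = true ↔ ∃ c ∈ cs, pvCheckA d subL length c = true := by
  induction cs with
  | nil => simp [pvLoopA]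
  | cons c rest ih =>
    simp only [pvLoopA, List.mem_cons]
    split_ifs with hc
    · simp [hc]
    · simp only [ih]
      constructor
      · rintro ⟨x, hx, h⟩; exact ⟨x, Or.inr hx, h⟩
      · rintro ⟨x, hx | hx, h⟩
        · exact absurd (hx ▸ h) (by simp [hc])
        · exact ⟨x, hx, h⟩

-- the condition checked per position
def pvOk (d : PySem.Dict (List Char) (List Char)) (c subL : List Char) (j : Nat) : Prop :=
  c.getD j ' ' = subL.getD j ' ' ∨
    c.getD j ' ' ∈ d.getD [subL.getD j ' '] [subL.getD j ' ']

-- the loop body of A's temp rebuild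
def pvStep (d : PySem.Dict (List Char) (List Char)) (c subL : List Char)
    (temp : List Char) (i : Int) : List Char :=
  let ch1 := (PySem.List.pyGet? c i).getD ' '
  let ch2 := (PySem.List.pyGet? subL i).getD ' '
  if ch1 ≠ ch2 then
    if (d.getD [ch2] [ch2]).contains ch1 then temp.set i.toNat ch1 else temp
  else temp

theorem checkA_eq (d : PySem.Dict (List Char) (List Char)) (subL : List Char) (length : Nat)
    (c : List Char) :
    pvCheckA d subL length c =
      (c == (PySem.List.pyRange 0 (length : Int)).foldl (pvStep d c subL) subL) := rfl

theorem temp_spec (d : PySem.Dict (List Char) (List Char)) (c subL : List Char)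
    (m : Nat) (hm : m ≤ subL.length) :
    ((PySem.List.pyRange 0 (m : Int)).foldl (pvStep d c subL) subL).length = subL.length ∧
    ∀ j : Nat,
      ((PySem.List.pyRange 0 (m : Int)).foldl (pvStep d c subL) subL).getD j ' ' =
        if j < m ∧ c.getD j ' ' ≠ subL.getD j ' ' ∧
            (d.getD [subL.getD j ' '] [subL.getD j ' ']).contains (c.getD j ' ')
          then c.getD j ' ' else subL.getD j ' ' := by
  induction m with
  | zero => simp [PySem.List.pyRange]
  | succ m ih =>
    have hm' : m ≤ subL.length := Nat.le_of_succ_le hm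
    obtain ⟨ihlen, ihget⟩ := ih hm'
    have hrange : PySem.List.pyRange 0 ((m + 1 : Nat) : Int) =
        PySem.List.pyRange 0 (m : Int) ++ [(m : Int)] := by
      push_cast
      exact PySem.List.pyRange_one_succ_right (by positivity)
    rw [hrange, List.foldl_append]
    set T := (PySem.List.pyRange 0 (m : Int)).foldl (pvStep d c subL) subL with hT
    simp only [List.foldl_cons, List.foldl_nil]
    have hchar1 : (PySem.List.pyGet? c (m : Int)).getD ' ' = c.getD m ' ' := by
      simp [PySem.List.pyGet?_natCast, List.getD_eq_getElem?_getD]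
    have hchar2 : (PySem.List.pyGet? subL (m : Int)).getD ' ' = subL.getD m ' ' := by
      simp [PySem.List.pyGet?_natCast, List.getD_eq_getElem?_getD]
    simp only [pvStep, hchar1, hchar2, Int.toNat_natCast]
    split_ifs with hne hcont
    · -- set at index m
      refine ⟨by simp [ihlen], fun j => ?_⟩
      by_cases hj : j = m
      · subst hj
        rw [List.getD_eq_getElem?_getD, List.getElem?_set_self (by omega)]
        simp only [Option.getD_some]
        rw [if_pos ⟨by omega, hne, hcont⟩]
      · rw [List.getD_eq_getElem?_getD, List.getElem?_set_ne (by omega),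
          ← List.getD_eq_getElem?_getD, ihget j]
        exact if_congr ⟨fun ⟨h1, h2⟩ => ⟨by omega, h2⟩, fun ⟨h1, h2⟩ => ⟨by omega, h2⟩⟩ rfl rfl
    · refine ⟨ihlen, fun j => ?_⟩
      rw [ihget j]
      by_cases hj : j = m
      · subst hj
        rw [if_neg (by omega), if_neg (by tauto)]
      · exact if_congr ⟨fun ⟨h1, h2⟩ => ⟨by omega, h2⟩, fun ⟨h1, h2⟩ => ⟨by omega, h2⟩⟩ rfl rfl
    · refine ⟨ihlen, fun j => ?_⟩
      rw [ihget j]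
      by_cases hj : j = m
      · subst hj
        rw [if_neg (by omega), if_neg (by simp at hne; tauto)]
      · exact if_congr ⟨fun ⟨h1, h2⟩ => ⟨by omega, h2⟩, fun ⟨h1, h2⟩ => ⟨by omega, h2⟩⟩ rfl rfl

theorem getD_eq_getElem_of_lt {xs : List Char} {j : Nat} (h : j < xs.length) :
    xs.getD j ' ' = xs[j] := by
  rw [List.getD_eq_getElem?_getD, List.getElem?_eq_getElem h, Option.getD_some]

theorem checkA_iff (d : PySem.Dict (List Char) (List Char)) (subL c : List Char)
    (hc : c.length = subL.length) :
    pvCheckA d subL subL.length c = true ↔ ∀ j < subL.length, pvOk d c subL j := by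
  rw [checkA_eq, beq_iff_eq]
  obtain ⟨hlen, hget⟩ := temp_spec d c subL subL.length le_rfl
  have key : ∀ j < subL.length,
      (c.getD j ' ' = (if j < subL.length ∧ c.getD j ' ' ≠ subL.getD j ' ' ∧
          (d.getD [subL.getD j ' '] [subL.getD j ' ']).contains (c.getD j ' ')
        then c.getD j ' ' else subL.getD j ' ')) ↔ pvOk d c subL j := by
    intro j hj
    unfold pvOk
    by_cases hne : c.getD j ' ' = subL.getD j ' '
    · rw [if_neg (by tauto)]
      exact ⟨fun _ => Or.inl hne, fun _ => hne⟩
    · by_cases hcont : (d.getD [subL.getD j ' '] [subL.getD j ' ']).contains (c.getD j ' ')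
      · rw [if_pos ⟨hj, hne, hcont⟩]
        simp only [List.contains_iff_mem] at hcont
        exact ⟨fun _ => Or.inr hcont, fun _ => rfl⟩
      · rw [if_neg (by tauto)]
        simp only [List.contains_iff_mem] at hcont
        constructor <;> intro h <;> tauto
  constructor
  · intro heq j hj
    rw [← key j hj, ← hget j, ← heq]
  · intro h
    apply List.ext_getElem (by omega)
    intro j hj1 hj2
    rw [← getD_eq_getElem_of_lt hj1, ← getD_eq_getElem_of_lt hj2, hget j]
    exact (key j (by omega)).mpr (h j (by omega))

theorem mem_inner (sL : List Char) (n : Int) (st : Char) (acc : List Int) (i : Int) :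
    i ∈ (PySem.List.pyRange 0 n).foldl (fun acc i =>
        if ((PySem.List.pyGet? sL i).getD ' ') == st then acc ++ [i] else acc) acc ↔
      i ∈ acc ∨ (0 ≤ i ∧ i < n ∧ (PySem.List.pyGet? sL i).getD ' ' = st) := by
  rw [PySem.List.foldl_append_if (fun i => ((PySem.List.pyGet? sL i).getD ' ') == st)
    (fun i => i) (PySem.List.pyRange 0 n) acc]
  simp [List.mem_filter, PySem.List.mem_pyRange_one, beq_iff_eq]
  tauto

theorem mem_sindex (sL : List Char) (starts : List Char) (acc : List Int) (i : Int) :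
    i ∈ starts.foldl (fun acc start =>
        (PySem.List.pyRange 0 (sL.length : Int)).foldl (fun acc i =>
          if ((PySem.List.pyGet? sL i).getD ' ') == start then acc ++ [i] else acc) acc) acc ↔
      i ∈ acc ∨ (0 ≤ i ∧ i < (sL.length : Int) ∧ (PySem.List.pyGet? sL i).getD ' ' ∈ starts) := by
  induction starts generalizing acc with
  | nil => simp
  | cons st sts ih =>
    rw [List.foldl_cons, ih, mem_inner]
    simp only [List.mem_cons]
    tauto

theorem mem_candidates (sL : List Char) (length : Nat) (s_index : List Int)
    (acc : List (List Char)) (c : List Char) :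
    c ∈ s_index.foldl (fun acc start =>
        let cur := PySem.List.slice sL (some start) (some (start + (length : Int)))
        if cur.length == length then acc ++ [cur] else acc) acc ↔
      c ∈ acc ∨ ∃ i ∈ s_index,
        (PySem.List.slice sL (some i) (some (i + (length : Int)))).length = length ∧
        c = PySem.List.slice sL (some i) (some (i + (length : Int))) := by
  rw [show (fun (acc : List (List Char)) (start : Int) =>
        let cur := PySem.List.slice sL (some start) (some (start + (length : Int)))
        if cur.length == length then acc ++ [cur] else acc) =
      (fun acc start =>
        if (fun i => (PySem.List.slice sL (some i) (some (i + (length : Int)))).length == length) start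
        then acc ++ [(fun i => PySem.List.slice sL (some i) (some (i + (length : Int)))) start]
        else acc) from rfl]
  rw [PySem.List.foldl_append_if]
  simp only [List.mem_append, List.mem_map, List.mem_filter, beq_iff_eq]
  constructor
  · rintro (h | ⟨i, ⟨hi, hlen⟩, rfl⟩)
    · exact Or.inl h
    · exact Or.inr ⟨i, hi, hlen, rfl⟩
  · rintro (h | ⟨i, hi, hlen, rfl⟩)
    · exact Or.inl h
    · exact Or.inr ⟨i, ⟨hi, hlen⟩, rfl⟩

theorem slice_window (sL : List Char) (k L : Nat) :
    PySem.List.slice sL (some (k : Int)) (some ((k : Int) + (L : Int))) = (sL.drop k).take L := by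
  rw [show (k : Int) + (L : Int) = ((k + L : Nat) : Int) by push_cast; ring,
    PySem.List.slice_natCast]
  congr 1
  omega

theorem window_getD (sL : List Char) (k L j : Nat) (hj : j < L) (hk : k + L ≤ sL.length) :
    ((sL.drop k).take L).getD j ' ' = sL.getD (k + j) ' ' := by
  rw [getD_eq_getElem_of_lt (by simp; omega), getD_eq_getElem_of_lt (by omega)]
  rw [List.getElem_take, List.getElem_drop]

theorem pyGetD_natCast (xs : List Char) (k : Nat) :
    (PySem.List.pyGet? xs (k : Int)).getD ' ' = xs.getD k ' ' := by
  rw [PySem.List.pyGet?_natCast]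
  simp [List.getD_eq_getElem?_getD]

theorem mem_starts (d : PySem.Dict (List Char) (List Char)) (x c0 : Char) :
    x ∈ (c0 :: d.getD [c0] []) ↔ (x = c0 ∨ x ∈ d.getD [c0] [c0]) := by
  rw [List.mem_cons, dict_getD_eq, dict_getD_eq]
  cases hg : d.get? [c0] with
  | some v => simp
  | none => simp

def pvCondA (mappings : List (List String)) (sL subL : List Char) (k j : Nat) : Prop :=
  sL.getD (k + j) ' ' = subL.getD j ' ' ∨
    sL.getD (k + j) ' ' ∈ (pvDictA mappings).getD [subL.getD j ' '] [subL.getD j ' ']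

theorem pyGetD_zero (xs : List Char) :
    (PySem.List.pyGet? xs (0 : Int)).getD ' ' = xs.getD 0 ' ' := by
  simpa using pyGetD_natCast xs 0

theorem matchA_iff (s sub : String) (mappings : List (List String)) (hsub : sub.toList ≠ []) :
    matchReplacement s sub mappings = true ↔
      ∃ k : Nat, k + sub.toList.length ≤ s.toList.length ∧
        ∀ j < sub.toList.length, pvCondA mappings s.toList sub.toList k j := by
  simp only [matchReplacement]
  rw [loopA_iff]
  have hL : 0 < sub.toList.length := List.length_pos_iff.mpr hsub
  set sL := s.toList
  set subL := sub.toList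
  set d := pvDictA mappings
  set L := subL.length with hLdef
  set n := sL.length
  constructor
  · rintro ⟨c, hc, hcheck⟩
    rw [mem_candidates] at hc
    rcases hc with hc | ⟨i, his, hlenc, rfl⟩
    · simp at hc
    · rw [mem_sindex] at his
      rcases his with his | ⟨hi0, hin, _⟩
      · simp at his
      · have hik : i = ((i.toNat : Nat) : Int) := by omega
        rw [hik] at hlenc hcheck
        rw [slice_window] at hlenc hcheck
        set k := i.toNat
        have hkn : k < n := by omega
        have hkL : k + L ≤ n := by
          simp at hlenc; omega
        have hclen : ((sL.drop k).take L).length = subL.length := by simp; omega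
        refine ⟨k, hkL, fun j hj => ?_⟩
        have h := (checkA_iff d subL _ hclen).mp hcheck j hj
        unfold pvOk at h
        rw [window_getD sL k L j hj hkL] at h
        exact h
  · rintro ⟨k, hkL, hcond⟩
    have hkn : k < n := by omega
    have hc0 : (PySem.List.pyGet? subL 0).getD ' ' = subL.getD 0 ' ' := pyGetD_zero subL
    refine ⟨PySem.List.slice sL (some ((k : Nat) : Int)) (some (((k : Nat) : Int) + (L : Int))), ?_, ?_⟩
    · rw [mem_candidates]
      refine Or.inr ⟨((k : Nat) : Int), ?_, ?_, rfl⟩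
      · rw [mem_sindex]
        refine Or.inr ⟨by positivity, by exact_mod_cast hkn, ?_⟩
        rw [pyGetD_natCast, hc0, mem_starts]
        have h0 := hcond 0 hL
        unfold pvCondA at h0
        simpa using h0
      · rw [slice_window]; simp; omega
    · rw [slice_window]
      have hclen : ((sL.drop k).take L).length = subL.length := by simp; omega
      rw [checkA_iff d subL _ hclen]
      intro j hj
      unfold pvOk
      rw [window_getD sL k L j hj hkL]
      exact hcond j hj

def pvCondB (mappings : List (List String)) (sL subL : List Char) (k j : Nat) : Prop :=
  sL.getD (k + j) ' ' = subL.getD j ' ' ∨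
    sL.getD (k + j) ' ' ∈ (pvAllowedB mappings).getD [subL.getD j ' '] (PySem.Set.ofList [])

theorem matchB_iff (s sub : String) (mappings : List (List String)) :
    matchReplacement_alt s sub mappings = true ↔
      ∃ k : Nat, k + sub.toList.length ≤ s.toList.length ∧
        ∀ j < sub.toList.length, pvCondB mappings s.toList sub.toList k j := by
  simp only [matchReplacement_alt]
  rw [List.any_eq_true]
  set sL := s.toList
  set subL := sub.toList
  set L := subL.length
  set n := sL.length
  constructor
  · rintro ⟨i, hi, hall⟩
    rw [PySem.List.mem_pyRange_one] at hi
    obtain ⟨hi0, hin⟩ := hi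
    refine ⟨i.toNat, by omega, fun j hj => ?_⟩
    rw [List.all_eq_true] at hall
    have hj' := hall ((j : Nat) : Int) (by rw [PySem.List.mem_pyRange_one]; constructor <;> [positivity; exact_mod_cast hj])
    simp only at hj'
    rw [show i + ((j : Nat) : Int) = (((i.toNat + j : Nat)) : Int) by omega] at hj'
    rw [pyGetD_natCast, pyGetD_natCast] at hj'
    rcases Bool.or_eq_true _ _ |>.mp hj' with h | h
    · exact Or.inl (beq_iff_eq.mp h)
    · exact Or.inr ((PySem.Set.contains_iff _ _).mp h)
  · rintro ⟨k, hk, hcond⟩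
    refine ⟨((k : Nat) : Int), by rw [PySem.List.mem_pyRange_one]; omega, ?_⟩
    rw [List.all_eq_true]
    intro j hj
    rw [PySem.List.mem_pyRange_one] at hj
    obtain ⟨hj0, hjL⟩ := hj
    show _ = true
    rw [show ((k : Nat) : Int) + j = (((k + j.toNat : Nat)) : Int) by omega]
    rw [show j = ((j.toNat : Nat) : Int) by omega, pyGetD_natCast]
    rw [pyGetD_natCast]
    rcases hcond j.toNat (by omega) with h | h
    · exact Bool.or_eq_true _ _ |>.mpr (Or.inl (beq_iff_eq.mpr h))
    · exact Bool.or_eq_true _ _ |>.mpr (Or.inr ((PySem.Set.contains_iff _ _).mpr h))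

-- A's condition equals B's condition at every position
theorem cond_iff (mappings : List (List String)) (sL subL : List Char) (k j : Nat) :
    pvCondA mappings sL subL k j ↔ pvCondB mappings sL subL k j := by
  unfold pvCondA pvCondB
  set x := sL.getD (k + j) ' '
  set c := subL.getD j ' '
  have h1 : (x = c ∨ x ∈ (pvDictA mappings).getD [c] [c]) ↔
      (x = c ∨ x ∈ (pvDictA mappings).getD [c] []) := by
    rw [dict_getD_eq, dict_getD_eq]
    cases hg : (pvDictA mappings).get? [c] with
    | some v => simp
    | none => simp
  rw [h1, dict_rel]

-- ===== VERDICT (by name: the statement is the Claim_ definition above) =====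
theorem matchReplacement_spec : Claim_equal_matchReplacement := by
  intro s sub mappings _ hpre
  unfold Spec_matchReplacement
  have h : matchReplacement s sub mappings = true ↔
      matchReplacement_alt s sub mappings = true := by
    rw [matchA_iff s sub mappings hpre.1, matchB_iff]
    exact exists_congr fun k => and_congr_right fun _ =>
      forall₂_congr fun j hj => cond_iff mappings s.toList sub.toList k j
  cases hA : matchReplacement s sub mappings <;>
    cases hB : matchReplacement_alt s sub mappings <;> simp_all
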